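-- pv_equiv track=rewrite | github.com/SevkavTV/Lab7_Team155 | tools/ulam_numbers.py | ulam_numbers
-- ===== SOURCE A (Python) =====
-- def ulam_numbers(n: int) -> list:
--     """
--     Function returns the list of Ulam numbers of the given range.
--     If parameter n is not an int function returns None.
--
--     Ulam numbers sequence:
--     1. Next Ulam number is bigger than the last one.
--     2. Next Ulam is the sum of two previous Ulams.
--     3. There's only one way to find the next Ulam.
--
--     >>> ulam_numbers(10)
--     [1, 2, 3, 4, 6, 8]
--     >>> ulam_numbers(3)
--     [1, 2]
--     """
--
--     # set basic ulam sequence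
--     ulam = [1, 2]
--     next_ulam = 0
--
--     # append next ulam to the list while ulam is less than n
--     while next_ulam < n:
--         all_sums = []
--
--         # check every possible sum
--         for pos in range(len(ulam) - 1):
--             for p in range(pos + 1, len(ulam)):
--                 all_sums.append(ulam[pos] + ulam[p])
--
--         all_sums.sort()
--
--         # check if the sum is unique and greater than the last ulam
--         for elem in all_sums:
--             if elem > ulam[-1] and all_sums.count(elem) == 1:
--                 next_ulam = elem
--                 break
--
--         ulam.append(next_ulam)
--
--     return ulam[:-1]
-- ===== SOURCE B (Python) =====
-- def ulam_numbers(n: int) -> list: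
--     """Ulam numbers below n, via an incremental counter of two-term sums."""
--     ulam = [1, 2]
--     counts = {3: 1}
--     while ulam[-1] < n:
--         last = ulam[-1]
--         nxt = min(s for s, c in counts.items() if c == 1 and s > last)
--         for u in ulam:
--             counts[u + nxt] = counts.get(u + nxt, 0) + 1
--         ulam.append(nxt)
--     return ulam[:-1]
-- ===== Notes on version B (the rewrite author's own statement) =====
-- stated objective: faster
-- what changed: Instead of rebuilding, sorting and linearly re-counting the full quadratic list of pairwise sums on every iteration, B maintains a dict counting how many ways each value is a sum of two distinct Ulam numbers, updates it only with the sums involving the newly appended term, and picks the next Ulam as the minimum unique-count key above the last term.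
-- intended difference: For n = 1 and n = 2, A's loop runs one forced iteration (next_ulam is initialised to 0) and returns [1, 2], which wrongly includes Ulam numbers >= n; B's loop guard compares the last generated term with n and returns [1], the correct list of Ulam numbers below 2 (for n = 2) and a defensible trim for n = 1. — e.g. on ulam_numbers(2): A returns [1, 2], B returns [1]
import Mathlib
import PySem

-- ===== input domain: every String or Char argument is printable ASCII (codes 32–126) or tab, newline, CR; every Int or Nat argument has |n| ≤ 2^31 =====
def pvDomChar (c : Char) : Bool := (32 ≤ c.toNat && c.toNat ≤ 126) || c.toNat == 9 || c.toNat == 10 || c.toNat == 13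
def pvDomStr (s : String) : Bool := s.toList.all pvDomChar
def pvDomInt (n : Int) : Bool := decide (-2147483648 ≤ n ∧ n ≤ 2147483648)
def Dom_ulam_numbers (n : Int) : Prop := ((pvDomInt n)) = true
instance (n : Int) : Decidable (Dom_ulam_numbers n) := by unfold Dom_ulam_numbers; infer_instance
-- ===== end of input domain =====

-- B replaces A's per-iteration rebuild/sort/recount of all pairwise sums by an incrementally
-- maintained dict of sum multiplicities (objective: faster).

-- ===== PORT A =====
-- the two nested index loops building all_sums
def pvSumsA (ulam : List Int) : List Int :=
  (PySem.List.pyRange 0 (PySem.List.len ulam - 1) 1).foldl (fun all_sums pos =>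
    (PySem.List.pyRange (pos + 1) (PySem.List.len ulam) 1).foldl (fun all_sums p =>
      all_sums ++ [PySem.List.pyGetD ulam pos 0 + PySem.List.pyGetD ulam p 0]) all_sums) []

-- all_sums.sort(); then the first-match scan (for … break), falling back to the old next_ulam
-- (indices pos, p are always in range, so pyGetD's default 0 is never read)
def pvNextA (ulam : List Int) (next_ulam : Int) : Int :=
  let all_sums := PySem.List.sorted (pvSumsA ulam) (fun x => x) false
  match all_sums.find? (fun elem =>
      decide (PySem.List.pyGetD ulam (-1) 0 < elem) && (all_sums.count elem == 1)) with
  | some elem => elem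
  | none => next_ulam

-- the while loop; fuel n.toNat + 2 bounds the iteration count (next_ulam grows by ≥ 1 per pass)
def pvLoopA (n : Int) : Nat → List Int → Int → List Int
  | 0, ulam, _ => ulam
  | fuel + 1, ulam, next_ulam =>
    if next_ulam < n then
      let nx := pvNextA ulam next_ulam
      pvLoopA n fuel (ulam ++ [nx]) nx
    else ulam

def ulam_numbers (n : Int) : List Int :=
  PySem.List.slice (pvLoopA n (n.toNat + 2) [1, 2] 0) none (some (-1))

-- ===== PORT B =====
-- for u in ulam: counts[u + nxt] = counts.get(u + nxt, 0) + 1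
def pvBump (counts : PySem.Dict Int Int) (ulam : List Int) (nxt : Int) : PySem.Dict Int Int :=
  ulam.foldl (fun c u => c.insert (u + nxt) (c.getD (u + nxt) 0 + 1)) counts

-- the while loop; min(s for s, c in counts.items() if c == 1 and s > ulam[-1]) — Python would
-- raise ValueError were the generator empty; that never happens (the top pair-sum is unique),
-- so the none branch is unreachable on the loop's reachable states
def pvLoopB (n : Int) : Nat → List Int → PySem.Dict Int Int → List Int
  | 0, ulam, _ => ulam
  | fuel + 1, ulam, counts =>
    if PySem.List.pyGetD ulam (-1) 0 < n then
      match PySem.List.min? ((counts.items.filter (fun kv =>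
          kv.2 == 1 && decide (PySem.List.pyGetD ulam (-1) 0 < kv.1))).map (fun kv => kv.1))
          (fun s => s) with
      | some nxt => pvLoopB n fuel (ulam ++ [nxt]) (pvBump counts ulam nxt)
      | none => ulam
    else ulam

def ulam_numbers_alt (n : Int) : List Int :=
  PySem.List.slice (pvLoopB n (n.toNat + 2) [1, 2] (PySem.Dict.ofList [(3, 1)])) none (some (-1))

-- ===== PRECONDITION & SPEC =====
-- For n = 1 and n = 2, A's loop runs one forced iteration (next_ulam is initialised to 0) and
-- returns [1, 2], which wrongly includes Ulam numbers ≥ n; B's loop guard compares the last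
-- generated term with n and returns [1], the correct list of Ulam numbers below 2 (for n = 2)
-- and a defensible trim for n = 1.
def D_ulam_numbers (n : Int) : Prop := 1 ≤ n ∧ n ≤ 2
instance (n : Int) : Decidable (D_ulam_numbers n) := by unfold D_ulam_numbers; infer_instance

def Spec_ulam_numbers (n : Int) (out : List Int) : Prop := ¬ D_ulam_numbers n → out = ulam_numbers_alt n
instance (n : Int) (out : List Int) : Decidable (Spec_ulam_numbers n out) := by unfold Spec_ulam_numbers; infer_instance

def pvDiffWitness_ulam_numbers : Int := 2
def pvDiffWitnessOut_ulam_numbers : (List Int) × (List Int) := ([1, 2], [1])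

-- ===== CLAIM (what is proved, stated in full; the proofs are below) =====
def Claim_unchanged_ulam_numbers : Prop := ∀ (n : Int), Dom_ulam_numbers n → Spec_ulam_numbers n (ulam_numbers n)
def Claim_changed_ulam_numbers : Prop := Dom_ulam_numbers (pvDiffWitness_ulam_numbers) ∧ D_ulam_numbers (pvDiffWitness_ulam_numbers) ∧ ulam_numbers (pvDiffWitness_ulam_numbers) = pvDiffWitnessOut_ulam_numbers.1 ∧ ulam_numbers_alt (pvDiffWitness_ulam_numbers) = pvDiffWitnessOut_ulam_numbers.2 ∧ pvDiffWitnessOut_ulam_numbers.1 ≠ pvDiffWitnessOut_ulam_numbers.2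
def Claim_exact_ulam_numbers : Prop := ∀ (n : Int), Dom_ulam_numbers n → D_ulam_numbers n → ulam_numbers n ≠ ulam_numbers_alt n

-- ===== LEMMAS AND PROOFS =====

-- structural form of the list of sums of two distinct members (same order as A's index loops)
def pvSums : List Int → List Int
  | [] => []
  | x :: xs => xs.map (x + ·) ++ pvSums xs

-- the loop invariant tying B's dict to the multiset of pairwise sums of the current sequence
def pvInv (ulam : List Int) (counts : PySem.Dict Int Int) : Prop :=
  2 ≤ ulam.length ∧ ulam.Pairwise (· < ·) ∧ (∀ x ∈ ulam, 1 ≤ x) ∧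
  counts.keys.Nodup ∧
  (∀ k, counts.getD k 0 = ((pvSums ulam).count k : Int)) ∧
  (∀ k, k ∈ counts.keys ↔ k ∈ pvSums ulam)

lemma pv_map_range_getD (f : Int → Int) (l : List Int) :
    (List.range l.length).map (fun k => f (l.getD k 0)) = l.map f := by
  induction l with
  | nil => simp
  | cons x xs ih =>
      simp [List.range_succ_eq_map, List.map_map]
      exact ih

lemma pv_flatMap_congr {α β : Type} (l : List α) {f g : α → List β} (h : ∀ x ∈ l, f x = g x) :
    l.flatMap f = l.flatMap g := by
  induction l with
  | nil => rfl
  | cons x xs ih =>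
      rw [List.flatMap_cons, List.flatMap_cons, h x (by simp),
        ih (fun y hy => h y (List.mem_cons_of_mem _ hy))]

-- Nat-indexed form of A's double loop
def pvIdxSums (m : List Int) : List Int :=
  (List.range (m.length - 1)).flatMap (fun k =>
    (List.range (m.length - 1 - k)).map (fun j => m.getD k 0 + m.getD (k + 1 + j) 0))

lemma pv_pyRange_natCast (a b : Nat) :
    PySem.List.pyRange (a : Int) (b : Int) 1 = (List.range (b - a)).map (fun k => ((a + k : Nat) : Int)) := by
  rw [PySem.List.pyRange_one]
  have h : (((b : Int)) - a).toNat = b - a := by omega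
  rw [h]
  apply List.map_congr_left
  intro k _
  push_cast
  ring

lemma pv_pyRange0_natCast (b : Nat) :
    PySem.List.pyRange 0 (b : Int) 1 = (List.range b).map (fun k => ((k : Nat) : Int)) := by
  have h := pv_pyRange_natCast 0 b
  simpa using h

lemma pvSumsA_eq_idx (m : List Int) : pvSumsA m = pvIdxSums m := by
  have hA : pvSumsA m = (PySem.List.pyRange 0 (PySem.List.len m - 1) 1).flatMap (fun pos =>
      (PySem.List.pyRange (pos + 1) (PySem.List.len m) 1).map
        (fun p => PySem.List.pyGetD m pos 0 + PySem.List.pyGetD m p 0)) := by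
    have hcongr : (PySem.List.pyRange 0 (PySem.List.len m - 1) 1).foldl
        (fun all_sums pos => (PySem.List.pyRange (pos + 1) (PySem.List.len m) 1).foldl
          (fun all_sums p => all_sums ++ [PySem.List.pyGetD m pos 0 + PySem.List.pyGetD m p 0]) all_sums) []
        = (PySem.List.pyRange 0 (PySem.List.len m - 1) 1).foldl
          (fun all_sums pos => all_sums ++ (PySem.List.pyRange (pos + 1) (PySem.List.len m) 1).map
            (fun p => PySem.List.pyGetD m pos 0 + PySem.List.pyGetD m p 0)) [] :=
      PySem.List.foldl_congr_mem _ _ _ _ (fun acc x _ => PySem.List.foldl_append_singleton_eq_map _ _ _)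
    rw [pvSumsA, hcongr, PySem.List.foldl_append_eq_flatMap]
    exact List.nil_append _
  rw [hA]
  cases m with
  | nil => rfl
  | cons x xs =>
      set m := x :: xs with hm
      have hlen : PySem.List.len m - 1 = ((m.length - 1 : Nat) : Int) := by
        rw [PySem.List.len_eq, hm]; simp only [List.length_cons]; push_cast; ring
      have hlen2 : PySem.List.len m = ((m.length : Nat) : Int) := PySem.List.len_eq m
      rw [hlen, pv_pyRange0_natCast, List.flatMap_map]
      rw [pvIdxSums]
      apply pv_flatMap_congr
      intro k hk
      try simp only [Function.comp_apply]
      rw [hlen2, show ((k : Nat) : Int) + 1 = (((k + 1 : Nat)) : Int) from by push_cast; ring,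
        pv_pyRange_natCast, List.map_map]
      rw [show m.length - (k + 1) = m.length - 1 - k from by omega]
      apply List.map_congr_left
      intro j hj
      try simp only [Function.comp_apply]
      rw [PySem.List.pyGetD_natCast, PySem.List.pyGetD_natCast]

lemma pvIdx_eq_pvSums (l : List Int) : pvIdxSums l = pvSums l := by
  induction l with
  | nil => rfl
  | cons x xs ih =>
      cases xs with
      | nil => rfl
      | cons y ys =>
        rw [pvSums, ← ih]
        rw [pvIdxSums, pvIdxSums]
        rw [show (x :: y :: ys).length - 1 = ys.length + 1 from by simp]
        rw [List.range_succ_eq_map, List.flatMap_cons]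
        congr 1
        · rw [show ys.length + 1 - 0 = (y :: ys).length from by simp]
          rw [← pv_map_range_getD (fun w => x + w) (y :: ys)]
          apply List.map_congr_left
          intro j hj
          rw [show 0 + 1 + j = j + 1 from by omega]
          simp
        · rw [List.flatMap_map]
          rw [show (y :: ys).length - 1 = ys.length from by simp]
          apply pv_flatMap_congr
          intro k hk
          rw [show ys.length + 1 - Nat.succ k = (y :: ys).length - 1 - k from by
            simp only [List.length_cons]; omega]
          apply List.map_congr_left
          intro j hj
          rw [show Nat.succ k = k + 1 from rfl,
            show k + 1 + 1 + j = (k + 1 + j) + 1 from by omega]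
          simp

lemma pvSumsA_eq (l : List Int) : pvSumsA l = pvSums l := by
  rw [pvSumsA_eq_idx, pvIdx_eq_pvSums]

lemma pv_count_pvSums_append (l : List Int) (y k : Int) :
    (pvSums (l ++ [y])).count k = (pvSums l).count k + (l.map (· + y)).count k := by
  induction l with
  | nil => simp [pvSums]
  | cons x xs ih =>
      rw [List.cons_append,
        show pvSums (x :: (xs ++ [y])) = (xs ++ [y]).map (fun w => x + w) ++ pvSums (xs ++ [y]) from rfl,
        show pvSums (x :: xs) = xs.map (fun w => x + w) ++ pvSums xs from rfl]
      simp only [List.count_append, List.map_append, List.map_cons, List.map_nil,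
        List.count_cons, List.count_nil, ih]
      omega

lemma pv_mem_pvSums_append (l : List Int) (y k : Int) :
    k ∈ pvSums (l ++ [y]) ↔ k ∈ pvSums l ∨ k ∈ l.map (· + y) := by
  rw [← List.count_pos_iff, ← List.count_pos_iff, ← List.count_pos_iff,
    pv_count_pvSums_append]
  omega

lemma pv_le_getLast (l : List Int) (hp : l.Pairwise (· < ·)) (h : l ≠ []) :
    ∀ a ∈ l, a ≤ l.getLast h := by
  intro a ha
  rw [← List.dropLast_append_getLast h] at hp ha
  rcases List.pairwise_append.mp hp with ⟨-, -, hrel⟩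
  rcases List.mem_append.mp ha with h1 | h1
  · exact le_of_lt (hrel a h1 _ (by simp))
  · simp at h1; simp [h1]

lemma pv_pairwise_append (l : List Int) (y : Int) (hp : l.Pairwise (· < ·)) (h : l ≠ [])
    (hy : l.getLast h < y) : (l ++ [y]).Pairwise (· < ·) := by
  refine List.pairwise_append.mpr ⟨hp, by simp, ?_⟩
  intro a ha b hb
  simp only [List.mem_singleton] at hb
  subst hb
  exact lt_of_le_of_lt (pv_le_getLast l hp h a ha) hy

-- the sum of the two last terms bounds every pairwise sum and occurs exactly once
lemma pv_maxsum (l : List Int) (a b : Int) (hc : (l ++ [a, b]).Pairwise (· < ·)) :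
    (∀ z ∈ pvSums (l ++ [a, b]), z ≤ a + b) ∧ (pvSums (l ++ [a, b])).count (a + b) = 1 := by
  induction l with
  | nil =>
      constructor
      · intro z hz
        simp [pvSums] at hz
        omega
      · simp [pvSums]
  | cons x l ih =>
      rw [List.cons_append] at hc
      obtain ⟨hx, hp'⟩ := List.pairwise_cons.mp hc
      have hne : l ++ [a, b] ≠ [] := by simp
      have hlastb : (l ++ [a, b]).getLast hne = b := by
        rw [List.getLast_append]
        simp
      have hb' : ∀ z ∈ l ++ [a, b], z ≤ b := by
        have hh := pv_le_getLast _ hp' hne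
        rw [hlastb] at hh
        exact hh
      have ha' : x < a := hx a (by simp)
      obtain ⟨ih1, ih2⟩ := ih hp'
      constructor
      · intro z hz
        rw [List.cons_append] at hz
        simp only [pvSums, List.mem_append] at hz
        rcases hz with hz | hz
        · rcases List.mem_map.mp hz with ⟨w, hw, rfl⟩
          have := hb' w hw
          omega
        · exact ih1 z hz
      · rw [List.cons_append]
        simp only [pvSums, List.count_append]
        rw [ih2]
        have hz0 : List.count (a + b) ((l ++ [a, b]).map (fun w => x + w)) = 0 := by
          rw [List.count_eq_zero]
          intro hmem
          rcases List.mem_map.mp hmem with ⟨w, hw, he⟩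
          have := hb' w hw
          omega
        omega

-- decompose a list of length ≥ 2 as m ++ [a, b] with b its last element
lemma pv_split_two (l : List Int) (h2 : 2 ≤ l.length) (h : l ≠ []) :
    ∃ m a b, l = m ++ [a, b] ∧ l.getLast h = b := by
  have h1 := List.dropLast_append_getLast h
  have hd : l.dropLast ≠ [] := by
    intro he
    have hl := congrArg List.length h1
    rw [he] at hl
    simp at hl
    omega
  have h2' := List.dropLast_append_getLast hd
  refine ⟨l.dropLast.dropLast, l.dropLast.getLast hd, l.getLast h, ?_, rfl⟩
  conv_lhs => rw [← h1, ← h2']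
  simp

-- B's candidate list contains exactly the values with a unique representation above the last term
lemma pv_cands_mem (ulam : List Int) (counts : PySem.Dict Int Int) (hInv : pvInv ulam counts)
    (z : Int) :
    z ∈ ((counts.items.filter (fun kv =>
        kv.2 == 1 && decide (PySem.List.pyGetD ulam (-1) 0 < kv.1))).map (fun kv => kv.1)) ↔
      ((pvSums ulam).count z = 1 ∧ PySem.List.pyGetD ulam (-1) 0 < z) := by
  obtain ⟨-, -, -, hnd, hgetD, hkeys⟩ := hInv
  constructor
  · intro hz
    rcases List.mem_map.mp hz with ⟨kv, hkv, rfl⟩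
    rcases List.mem_filter.mp hkv with ⟨hmem, hcondb⟩
    have hc2 : kv.2 = 1 ∧ PySem.List.pyGetD ulam (-1) 0 < kv.1 := by simpa using hcondb
    have hg : counts.getD kv.1 0 = kv.2 :=
      PySem.Dict.getD_of_mem_items counts (by simpa using hmem) hnd 0
    have hcast : ((pvSums ulam).count kv.1 : Int) = 1 := by
      rw [← hgetD kv.1, hg, hc2.1]
    exact ⟨by exact_mod_cast hcast, hc2.2⟩
  · rintro ⟨h1, h2⟩
    have hzmem : z ∈ pvSums ulam := List.count_pos_iff.mp (by omega)
    have hk : z ∈ counts.keys := (hkeys z).mpr hzmem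
    have hk' : z ∈ counts.items.map (fun p => p.1) := by
      simpa [PySem.Dict.keys] using hk
    rcases List.mem_map.mp hk' with ⟨kv, hkv, hfst⟩
    have hg : counts.getD kv.1 0 = kv.2 :=
      PySem.Dict.getD_of_mem_items counts (by simpa using hkv) hnd 0
    have h12 : kv.2 = 1 := by
      rw [← hg, hgetD kv.1, hfst, h1]
      rfl
    refine List.mem_map.mpr ⟨kv, List.mem_filter.mpr ⟨hkv, ?_⟩, hfst⟩
    simp [h12, hfst, h2]

-- the invariant survives one step
lemma pv_inv_step (ulam : List Int) (counts : PySem.Dict Int Int) (y : Int)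
    (hInv : pvInv ulam counts) (h : ulam ≠ []) (hy : ulam.getLast h < y) :
    pvInv (ulam ++ [y]) (pvBump counts ulam y) := by
  obtain ⟨h2, hp, hpos, hnd, hgetD, hkeys⟩ := hInv
  have hfold : pvBump counts ulam y
      = List.foldl (fun d x => d.insert x (d.getD x 0 + 1)) counts (ulam.map (fun u => u + y)) := by
    rw [pvBump, List.foldl_map]
  refine ⟨by simp; omega, pv_pairwise_append ulam y hp h hy, ?_, ?_, ?_, ?_⟩
  · intro x hx
    rcases List.mem_append.mp hx with hx | hx
    · exact hpos x hx
    · simp only [List.mem_singleton] at hx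
      subst hx
      have := hpos _ (List.getLast_mem h)
      omega
  · rw [hfold]
    exact PySem.Dict.nodup_keys_foldl_insert _ _ _ hnd
  · intro k
    rw [hfold, PySem.Dict.getD_foldl_insert_add_one, hgetD k, pv_count_pvSums_append]
    push_cast
    ring
  · intro k
    rw [hfold, PySem.Dict.keys_foldl_insert, PySem.Set.mem_update,
      pv_mem_pvSums_append, hkeys k]

-- under the invariant both versions select the same next term, and it exceeds the last one
lemma pv_select (ulam : List Int) (counts : PySem.Dict Int Int) (next : Int)
    (hInv : pvInv ulam counts) (h : ulam ≠ []) :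
    ∃ y, pvNextA ulam next = y ∧
      PySem.List.min? ((counts.items.filter (fun kv =>
        kv.2 == 1 && decide (PySem.List.pyGetD ulam (-1) 0 < kv.1))).map (fun kv => kv.1))
        (fun s => s) = some y ∧
      ulam.getLast h < y := by
  obtain ⟨h2, hp, hpos, -, -, -⟩ := id hInv
  obtain ⟨m, a, b, hrep, hlastb⟩ := pv_split_two ulam h2 h
  have hmax := pv_maxsum m a b (by rw [← hrep]; exact hp)
  have hcount_ab : (pvSums ulam).count (a + b) = 1 := by rw [hrep]; exact hmax.2
  have hlastD : PySem.List.pyGetD ulam (-1) 0 = b := by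
    rw [PySem.List.pyGetD_neg_one ulam 0 h, hlastb]
  have hapos : 1 ≤ a := hpos a (by rw [hrep]; simp)
  have hb_lt : b < a + b := by omega
  -- A side: the sorted scan
  set s := PySem.List.sorted (pvSums ulam) (fun x => x) false with hs
  have hperm : s.Perm (pvSums ulam) := PySem.List.sorted_perm _ _ _
  have hcnt : ∀ z, s.count z = (pvSums ulam).count z := fun z => hperm.count_eq z
  have hmem_ab : (a + b) ∈ s := hperm.mem_iff.mpr (List.count_pos_iff.mp (by omega))
  set pred := (fun e => decide (PySem.List.pyGetD ulam (-1) 0 < e) && (s.count e == 1)) with hpred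
  have hpred_ab : pred (a + b) = true := by
    simp [hpred, hcnt, hcount_ab, hlastD, hb_lt]
  have hsome : (s.find? pred).isSome := List.find?_isSome.mpr ⟨a + b, hmem_ab, hpred_ab⟩
  obtain ⟨e, hfind⟩ := Option.isSome_iff_exists.mp hsome
  obtain ⟨hpe, as, bs, hsplit, hnotas⟩ := List.find?_eq_some_iff_append.mp hfind
  have hemem : e ∈ s := List.mem_of_find?_eq_some hfind
  have hpair : s.Pairwise (· ≤ ·) := by
    have hq := PySem.List.sorted_pairwise (pvSums ulam) (fun x => x)
    simpa [hs] using hq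
  have hminA : ∀ z ∈ s, pred z = true → e ≤ z := by
    intro z hz hpz
    rw [hsplit] at hz hpair
    rcases List.mem_append.mp hz with hz | hz
    · exact absurd hpz (by simpa using hnotas z hz)
    · rcases List.mem_cons.mp hz with rfl | hz
      · exact le_refl _
      · obtain ⟨-, hpc, -⟩ := List.pairwise_append.mp hpair
        exact (List.pairwise_cons.mp hpc).1 z hz
  have hpe' : PySem.List.pyGetD ulam (-1) 0 < e ∧ (pvSums ulam).count e = 1 := by
    rw [hpred] at hpe
    simp [hcnt] at hpe
    exact hpe
  -- B side: the dict scan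
  have hmemc := pv_cands_mem ulam counts hInv
  have hab_c : (a + b) ∈ ((counts.items.filter (fun kv =>
      kv.2 == 1 && decide (PySem.List.pyGetD ulam (-1) 0 < kv.1))).map (fun kv => kv.1)) :=
    (hmemc _).mpr ⟨hcount_ab, by rw [hlastD]; exact hb_lt⟩
  obtain ⟨w, hw⟩ : ∃ w, PySem.List.min? ((counts.items.filter (fun kv =>
      kv.2 == 1 && decide (PySem.List.pyGetD ulam (-1) 0 < kv.1))).map (fun kv => kv.1))
      (fun s => s) = some w := by
    cases hmw : PySem.List.min? ((counts.items.filter (fun kv =>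
        kv.2 == 1 && decide (PySem.List.pyGetD ulam (-1) 0 < kv.1))).map (fun kv => kv.1))
        (fun s => s) with
    | none =>
        rw [PySem.List.min?_eq_none_iff] at hmw
        rw [hmw] at hab_c
        simp at hab_c
    | some w => exact ⟨w, rfl⟩
  have hwc := (hmemc w).mp (PySem.List.min?_mem hw)
  have hwmin : ∀ z, ((pvSums ulam).count z = 1 ∧ PySem.List.pyGetD ulam (-1) 0 < z) → w ≤ z := by
    intro z hz
    exact PySem.List.min?_isMin hw z ((hmemc z).mpr hz)
  have hew : e ≤ w := by
    apply hminA w (hperm.mem_iff.mpr (List.count_pos_iff.mp (by omega)))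
    simp [hpred, hcnt, hwc.1, hwc.2]
  have hwe : w ≤ e := hwmin e ⟨hpe'.2, hpe'.1⟩
  have hwey : w = e := le_antisymm hwe hew
  refine ⟨e, ?_, ?_, ?_⟩
  · simp only [pvNextA, pvSumsA_eq, ← hs, ← hpred, hfind]
  · rw [hw, hwey]
  · have hq := hpe'.1
    rw [hlastD] at hq
    rw [hlastb]
    exact hq

lemma pv_loop_eq (n : Int) : ∀ (fuel : Nat) (ulam : List Int) (counts : PySem.Dict Int Int)
    (next : Int), pvInv ulam counts →
    ((next < n) ↔ (PySem.List.pyGetD ulam (-1) 0 < n)) →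
    pvLoopA n fuel ulam next = pvLoopB n fuel ulam counts := by
  intro fuel
  induction fuel with
  | zero => intro ulam counts next _ _; rfl
  | succ fuel ih =>
      intro ulam counts next hInv hcond
      have h : ulam ≠ [] := by
        intro he; rw [he] at hInv; simp [pvInv] at hInv
      obtain ⟨y, hA, hB, hy⟩ := pv_select ulam counts next hInv h
      by_cases hlt : PySem.List.pyGetD ulam (-1) 0 < n
      · rw [pvLoopA, pvLoopB, if_pos (hcond.mpr hlt), if_pos hlt, hA, hB]
        exact ih (ulam ++ [y]) (pvBump counts ulam y) y (pv_inv_step ulam counts y hInv h hy)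
          (by rw [PySem.List.pyGetD_neg_one_append_singleton])
      · rw [pvLoopA, pvLoopB, if_neg (fun hx => hlt (hcond.mp hx)), if_neg hlt]

lemma pv_inv_init : pvInv [1, 2] (PySem.Dict.ofList [(3, 1)]) := by
  have hD : PySem.Dict.ofList [((3 : Int), (1 : Int))] = (PySem.Dict.empty).insert 3 1 := rfl
  refine ⟨by decide, by decide, by decide, by decide, ?_, ?_⟩
  · intro k
    by_cases hk : k = 3
    · subst hk; decide
    · rw [hD, PySem.Dict.getD_insert]
      rw [if_neg hk]
      have : pvSums [1, 2] = [3] := rfl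
      rw [this]
      simp [PySem.Dict.getD_empty, Ne.symm hk]
  · intro k
    rw [hD, PySem.Dict.mem_keys_insert]
    rw [show pvSums [1, 2] = [3] from rfl]
    simp [PySem.Dict.keys_empty]

-- ===== VERDICT (by name: the statement is the Claim_ definition above) =====
theorem ulam_numbers_spec : Claim_unchanged_ulam_numbers := by
  intro n _ hD
  have hn : n ≤ 0 ∨ 3 ≤ n := by
    by_contra hx
    exact hD ⟨by omega, by omega⟩
  unfold ulam_numbers ulam_numbers_alt
  rcases hn with hn | hn
  · have h0 : ¬ ((0 : Int) < n) := by omega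
    have h2 : ¬ (PySem.List.pyGetD ([1, 2] : List Int) (-1) 0 < n) := by
      rw [show PySem.List.pyGetD ([1, 2] : List Int) (-1) 0 = 2 from by decide]
      omega
    rw [show n.toNat + 2 = (n.toNat + 1) + 1 from rfl, pvLoopA, pvLoopB]
    rw [if_neg h0, if_neg h2]
  · have hiff : ((0 : Int) < n) ↔ (PySem.List.pyGetD ([1, 2] : List Int) (-1) 0 < n) := by
      rw [show PySem.List.pyGetD ([1, 2] : List Int) (-1) 0 = 2 from by decide]
      omega
    rw [pv_loop_eq n (n.toNat + 2) [1, 2] (PySem.Dict.ofList [(3, 1)]) 0 pv_inv_init hiff]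

theorem ulam_numbers_changed : Claim_changed_ulam_numbers := by
  unfold Claim_changed_ulam_numbers; decide

theorem ulam_numbers_tight : Claim_exact_ulam_numbers := by
  intro n _ hD
  have : n = 1 ∨ n = 2 := by
    obtain ⟨h1, h2⟩ := hD; omega
  rcases this with h | h <;> subst h <;> decide
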